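-- pv_equiv track=rewrite | github.com/hughluo/hashcode21 | main.py | drop_streets
-- ===== SOURCE A (Python) =====
-- def drop_streets(intersection_to_streets_map, street_to_traffic_map, threshhold):
--     available_streets = set()
--     for k, v in intersection_to_streets_map.items():
--         for s in v:
--             available_streets.add(s)
--
--     new_street_to_traffic_map = {k: v for k, v in street_to_traffic_map.items() if k in available_streets and street_to_traffic_map[k] >= threshhold}
--
--     new_intersection_to_streets_map = {}
--
--     # update the `intersection_to_streets_map` to delete the dropped street.
--     for k, v in intersection_to_streets_map.items():
--         new_streets = {s for s in v if s in new_street_to_traffic_map}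
--         if len(new_streets) == 0:
--             continue
--         new_intersection_to_streets_map[k] = new_streets
--     return new_intersection_to_streets_map, new_street_to_traffic_map
-- ===== SOURCE B (Python) =====
-- def drop_streets(intersection_to_streets_map, street_to_traffic_map, threshhold):
--     surviving = set()
--     new_intersection_to_streets_map = {}
--     for k, v in intersection_to_streets_map.items():
--         new_streets = {s for s in v
--                        if s in street_to_traffic_map and street_to_traffic_map[s] >= threshhold}
--         if new_streets:
--             surviving |= new_streets
--             new_intersection_to_streets_map[k] = new_streets
--     new_street_to_traffic_map = {k: v for k, v in street_to_traffic_map.items() if k in surviving}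
--     return new_intersection_to_streets_map, new_street_to_traffic_map
-- ===== Notes on version B (the rewrite author's own statement) =====
-- stated objective: simpler
-- what changed: B drops the available_streets pre-pass and the filtered-map membership test: a single loop over the intersections filters each street list directly against the original traffic map and collects the surviving streets, and the traffic map is then filtered once by that survivor set.
import Mathlib
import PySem

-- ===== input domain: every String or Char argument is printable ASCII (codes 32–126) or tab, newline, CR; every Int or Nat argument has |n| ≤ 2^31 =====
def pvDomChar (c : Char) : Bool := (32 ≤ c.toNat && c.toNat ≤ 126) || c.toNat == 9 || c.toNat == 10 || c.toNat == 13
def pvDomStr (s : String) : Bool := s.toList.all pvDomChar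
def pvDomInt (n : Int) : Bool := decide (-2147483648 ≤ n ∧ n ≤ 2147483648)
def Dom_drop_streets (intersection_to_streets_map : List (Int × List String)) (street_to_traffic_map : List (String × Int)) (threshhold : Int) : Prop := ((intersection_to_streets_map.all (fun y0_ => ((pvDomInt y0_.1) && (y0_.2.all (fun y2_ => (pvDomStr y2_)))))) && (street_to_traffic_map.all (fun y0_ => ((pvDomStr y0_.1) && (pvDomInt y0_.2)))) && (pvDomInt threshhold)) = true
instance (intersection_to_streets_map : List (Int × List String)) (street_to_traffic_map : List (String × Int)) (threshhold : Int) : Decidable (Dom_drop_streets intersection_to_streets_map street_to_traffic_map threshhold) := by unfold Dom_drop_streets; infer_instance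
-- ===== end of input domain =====

-- B fuses the work into one pass over the intersections (no separate `available_streets`
-- pre-pass and no membership test against the already-filtered traffic map: each street is
-- tested once against the original traffic map, and the traffic dict is then filtered by the
-- collected survivor set); objective: simpler decomposition, same result.

-- ===== PORT A =====
-- available_streets = set(); for k, v in …: for s in v: available_streets.add(s)
def dsA_avail (intersection_to_streets_map : List (Int × List String)) : PySem.Set String :=
  intersection_to_streets_map.foldl
    (fun acc kv => kv.2.foldl (fun a s => PySem.Set.add a s) acc) PySem.Set.empty

-- {k: v for k, v in street_to_traffic_map.items() if k in available_streets and street_to_traffic_map[k] >= threshhold}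
def dsA_ntm (street_to_traffic_map : List (String × Int)) (avail : PySem.Set String)
    (threshhold : Int) : PySem.Dict String Int :=
  street_to_traffic_map.foldl
    (fun d kv =>
      if avail.contains kv.1 &&
         decide ((PySem.Dict.mk street_to_traffic_map).getD kv.1 0 ≥ threshhold)
      then d.insert kv.1 kv.2 else d)
    PySem.Dict.empty

-- new_streets = {s for s in v if s in new_street_to_traffic_map}
def dsA_ns (ntm : PySem.Dict String Int) (v : List String) : PySem.Set String :=
  v.foldl (fun a s => if ntm.contains s then PySem.Set.add a s else a) PySem.Set.empty

def drop_streets (intersection_to_streets_map : List (Int × List String)) (street_to_traffic_map : List (String × Int)) (threshhold : Int) : (List (Int × List String)) × (List (String × Int)) :=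
  let available := dsA_avail intersection_to_streets_map
  let ntm := dsA_ntm street_to_traffic_map available threshhold
  let nim : PySem.Dict Int (List String) :=
    intersection_to_streets_map.foldl
      (fun d kv =>
        let ns := dsA_ns ntm kv.2
        if ns.length = 0 then d else d.insert kv.1 ns)
      PySem.Dict.empty
  (nim.items, ntm.items)

-- ===== PORT B =====
-- new_streets = {s for s in v if s in street_to_traffic_map and street_to_traffic_map[s] >= threshhold}
def dsB_ns (tmd : PySem.Dict String Int) (threshhold : Int) (v : List String) : PySem.Set String :=
  v.foldl (fun a s => if tmd.contains s && decide (tmd.getD s 0 ≥ threshhold)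
                      then PySem.Set.add a s else a) PySem.Set.empty

def drop_streets_alt (intersection_to_streets_map : List (Int × List String)) (street_to_traffic_map : List (String × Int)) (threshhold : Int) : (List (Int × List String)) × (List (String × Int)) :=
  let tmd : PySem.Dict String Int := PySem.Dict.mk street_to_traffic_map
  -- one pass: build the new intersection map and collect the surviving streets
  let st := intersection_to_streets_map.foldl
    (fun (st : PySem.Set String × PySem.Dict Int (List String)) kv =>
      let ns := dsB_ns tmd threshhold kv.2
      if ns.length ≠ 0 then (PySem.Set.update st.1 ns, st.2.insert kv.1 ns) else st)
    (PySem.Set.empty, PySem.Dict.empty)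
  -- {k: v for k, v in street_to_traffic_map.items() if k in surviving}
  let ntm : PySem.Dict String Int :=
    street_to_traffic_map.foldl
      (fun d kv => if st.1.contains kv.1 then d.insert kv.1 kv.2 else d)
      PySem.Dict.empty
  (st.2.items, ntm.items)

-- ===== PRECONDITION & SPEC =====
def Spec_drop_streets (intersection_to_streets_map : List (Int × List String)) (street_to_traffic_map : List (String × Int)) (threshhold : Int) (out : (List (Int × List String)) × (List (String × Int))) : Prop := out = drop_streets_alt intersection_to_streets_map street_to_traffic_map threshhold
instance (intersection_to_streets_map : List (Int × List String)) (street_to_traffic_map : List (String × Int)) (threshhold : Int) (out : (List (Int × List String)) × (List (String × Int))) : Decidable (Spec_drop_streets intersection_to_streets_map street_to_traffic_map threshhold out) := by unfold Spec_drop_streets; infer_instance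

-- ===== CLAIM (what is proved, stated in full; the proofs are below) =====
def Claim_equal_drop_streets : Prop := ∀ (intersection_to_streets_map : List (Int × List String)) (street_to_traffic_map : List (String × Int)) (threshhold : Int), Dom_drop_streets intersection_to_streets_map street_to_traffic_map threshhold → Spec_drop_streets intersection_to_streets_map street_to_traffic_map threshhold (drop_streets intersection_to_streets_map street_to_traffic_map threshhold)

-- ===== LEMMAS AND PROOFS =====

-- membership after a fold of set-updates: everything in the start plus every listed street
theorem mem_update_fold (im : List (Int × List String)) (s0 : PySem.Set String) (x : String) :
    x ∈ im.foldl (fun acc kv => PySem.Set.update acc kv.2) s0 ↔ x ∈ s0 ∨ ∃ kv ∈ im, x ∈ kv.2 := by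
  induction im generalizing s0 with
  | nil => simp
  | cons h t ih => simp [ih, PySem.Set.mem_update]; tauto

-- membership after a conditional Set.add fold (a set comprehension with a filter)
theorem mem_filter_add_fold (p : String → Bool) (v : List String) (s0 : PySem.Set String) (x : String) :
    x ∈ v.foldl (fun a s => if p s then PySem.Set.add a s else a) s0 ↔ x ∈ s0 ∨ (x ∈ v ∧ p x = true) := by
  induction v generalizing s0 with
  | nil => simp
  | cons h t ih =>
    simp only [List.foldl_cons, ih]
    by_cases hp : p h
    · simp [hp, PySem.Set.mem_add]
      constructor
      · rintro ((h1|rfl)|h2) <;> tauto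
      · rintro (h1|⟨(rfl|h2),h3⟩) <;> tauto
    · simp [hp]
      constructor
      · rintro (h1|h2) <;> tauto
      · rintro (h1|⟨(rfl|h2),h3⟩) <;> tauto

-- contains of a key-conditional insert fold (a dict comprehension with a key-only filter)
theorem contains_filter_fold (tm : List (String × Int)) (c : String → Bool)
    (d : PySem.Dict String Int) (x : String) :
    (tm.foldl (fun d kv => if c kv.1 then d.insert kv.1 kv.2 else d) d).contains x
      = (d.contains x || (tm.any (fun kv => kv.1 == x) && c x)) := by
  induction tm generalizing d with
  | nil => simp
  | cons h t ih =>
    simp only [List.foldl_cons, List.any_cons, ih]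
    by_cases hk : h.1 = x
    · subst hk
      by_cases hc : c h.1
      · simp [hc]
      · simp [hc]
    · have hne : (h.1 == x) = false := by simp [hk]
      by_cases hc : c h.1
      · have hne' : (x == h.1) = false := beq_eq_false_iff_ne.mpr (Ne.symm hk)
        simp [hc, PySem.Dict.contains_insert, hne, hne']
      · simp [hc, hne]

-- membership in B's per-intersection filtered set
theorem mem_dsB_ns (tmd : PySem.Dict String Int) (th : Int) (v : List String) (x : String) :
    x ∈ dsB_ns tmd th v ↔ x ∈ v ∧ (tmd.contains x && decide (tmd.getD x 0 ≥ th)) = true := by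
  simpa [dsB_ns, PySem.Set.empty] using
    mem_filter_add_fold (fun s => tmd.contains s && decide (tmd.getD s 0 ≥ th)) v [] x

-- the dict component of B's fused fold ignores the survivor component
theorem snd_dsB_fold (tmd : PySem.Dict String Int) (th : Int) (im : List (Int × List String))
    (s0 : PySem.Set String) (d0 : PySem.Dict Int (List String)) :
    (im.foldl
      (fun (st : PySem.Set String × PySem.Dict Int (List String)) kv =>
        let ns := dsB_ns tmd th kv.2
        if ns.length ≠ 0 then (PySem.Set.update st.1 ns, st.2.insert kv.1 ns) else st)
      (s0, d0)).2
    = im.foldl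
        (fun d kv =>
          let ns := dsB_ns tmd th kv.2
          if ns.length = 0 then d else d.insert kv.1 ns) d0 := by
  induction im generalizing s0 d0 with
  | nil => rfl
  | cons h t ih =>
    simp only [List.foldl_cons]
    by_cases hl : (dsB_ns tmd th h.2).length = 0
    · rw [if_neg (by simp [hl]), if_pos hl]; exact ih s0 d0
    · rw [if_pos hl, if_neg hl]; exact ih _ _

-- membership in B's running survivor set
theorem mem_dsB_surv (tmd : PySem.Dict String Int) (th : Int) (im : List (Int × List String))
    (s0 : PySem.Set String) (d0 : PySem.Dict Int (List String)) (x : String) :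
    x ∈ (im.foldl
      (fun (st : PySem.Set String × PySem.Dict Int (List String)) kv =>
        let ns := dsB_ns tmd th kv.2
        if ns.length ≠ 0 then (PySem.Set.update st.1 ns, st.2.insert kv.1 ns) else st)
      (s0, d0)).1
    ↔ x ∈ s0 ∨ ∃ kv ∈ im, x ∈ kv.2 ∧ (tmd.contains x && decide (tmd.getD x 0 ≥ th)) = true := by
  induction im generalizing s0 d0 with
  | nil => simp
  | cons h t ih =>
    simp only [List.foldl_cons]
    by_cases hl : (dsB_ns tmd th h.2).length = 0
    · have hnil : dsB_ns tmd th h.2 = [] := List.length_eq_zero_iff.mp hl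
      have hno : ¬ (x ∈ h.2 ∧ (tmd.contains x && decide (tmd.getD x 0 ≥ th)) = true) := by
        intro hx
        have : x ∈ dsB_ns tmd th h.2 := (mem_dsB_ns tmd th h.2 x).mpr hx
        simp [hnil] at this
      rw [if_neg (by simp [hl])]
      rw [ih]
      constructor
      · rintro (h1|⟨kv,hkv,hx⟩)
        · exact Or.inl h1
        · exact Or.inr ⟨kv, List.mem_cons_of_mem _ hkv, hx⟩
      · rintro (h1|⟨kv,hkv,hx⟩)
        · exact Or.inl h1
        · rcases List.mem_cons.mp hkv with rfl|hkv'
          · exact absurd hx hno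
          · exact Or.inr ⟨kv, hkv', hx⟩
    · rw [if_pos hl, ih]
      simp only [PySem.Set.mem_update, mem_dsB_ns]
      constructor
      · rintro ((h1|h2)|⟨kv,hkv,hx⟩)
        · exact Or.inl h1
        · exact Or.inr ⟨h, List.mem_cons_self, h2⟩
        · exact Or.inr ⟨kv, List.mem_cons_of_mem _ hkv, hx⟩
      · rintro (h1|⟨kv,hkv,hx⟩)
        · exact Or.inl (Or.inl h1)
        · rcases List.mem_cons.mp hkv with rfl|hkv'
          · exact Or.inl (Or.inr hx)
          · exact Or.inr ⟨kv, hkv', hx⟩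

-- membership in A's `available_streets`
theorem mem_dsA_avail (im : List (Int × List String)) (x : String) :
    x ∈ dsA_avail im ↔ ∃ kv ∈ im, x ∈ kv.2 := by
  have : dsA_avail im = im.foldl (fun acc kv => PySem.Set.update acc kv.2) PySem.Set.empty := rfl
  rw [this, mem_update_fold]
  simp [PySem.Set.empty]

-- A's filtered traffic map contains a street iff it is in the traffic map, available, and above threshold
theorem contains_dsA_ntm (im : List (Int × List String)) (tm : List (String × Int)) (th : Int)
    (s : String) :
    (dsA_ntm tm (dsA_avail im) th).contains s
      = ((PySem.Dict.mk tm).contains s && ((dsA_avail im).contains s &&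
          decide ((PySem.Dict.mk tm).getD s 0 ≥ th))) := by
  have h := contains_filter_fold tm
    (fun k => (dsA_avail im).contains k && decide ((PySem.Dict.mk tm).getD k 0 ≥ th))
    PySem.Dict.empty s
  simp only [dsA_ntm]
  rw [h, PySem.Dict.contains_empty, PySem.Dict.contains_mk]
  simp

-- on an intersection's own street list the two per-intersection sets coincide
theorem ns_eq (im : List (Int × List String)) (tm : List (String × Int)) (th : Int)
    (v : List String) (hv : ∀ s ∈ v, s ∈ dsA_avail im) :
    dsA_ns (dsA_ntm tm (dsA_avail im) th) v
      = dsB_ns (PySem.Dict.mk tm) th v := by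
  apply PySem.List.foldl_congr_mem
  intro acc x hx
  have hc : (dsA_ntm tm (dsA_avail im) th).contains x
      = ((PySem.Dict.mk tm).contains x && decide ((PySem.Dict.mk tm).getD x 0 ≥ th)) := by
    rw [contains_dsA_ntm]
    have : (dsA_avail im).contains x = true := by
      rw [PySem.Set.contains_eq_listContains]; exact List.elem_eq_true_of_mem (hv x hx)
    rw [this]
    simp [Bool.and_comm]
  rw [hc]

theorem drop_streets_eq (im : List (Int × List String)) (tm : List (String × Int)) (th : Int) :
    drop_streets im tm th = drop_streets_alt im tm th := by
  unfold drop_streets drop_streets_alt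
  dsimp only
  rw [snd_dsB_fold]
  have hnim :
      im.foldl (fun d kv =>
        let ns := dsA_ns (dsA_ntm tm (dsA_avail im) th) kv.2
        if ns.length = 0 then d else d.insert kv.1 ns) PySem.Dict.empty
      = im.foldl (fun d kv =>
        let ns := dsB_ns (PySem.Dict.mk tm) th kv.2
        if ns.length = 0 then d else d.insert kv.1 ns) PySem.Dict.empty := by
    apply PySem.List.foldl_congr_mem
    intro acc kv hkv
    have hns : dsA_ns (dsA_ntm tm (dsA_avail im) th) kv.2 = dsB_ns (PySem.Dict.mk tm) th kv.2 :=
      ns_eq im tm th kv.2 (fun s hs => (mem_dsA_avail im s).mpr ⟨kv, hkv, hs⟩)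
    simp only [hns]
  have hsurv : ∀ kv ∈ tm,
      ((dsA_avail im).contains kv.1 && decide ((PySem.Dict.mk tm).getD kv.1 0 ≥ th))
      = (im.foldl
          (fun (st : PySem.Set String × PySem.Dict Int (List String)) kv =>
            let ns := dsB_ns (PySem.Dict.mk tm) th kv.2
            if ns.length ≠ 0 then (PySem.Set.update st.1 ns, st.2.insert kv.1 ns) else st)
          (PySem.Set.empty, PySem.Dict.empty)).1.contains kv.1 := by
    intro kv hkv
    have htmd : (PySem.Dict.mk tm).contains kv.1 = true := by
      rw [PySem.Dict.contains_mk]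
      exact List.any_eq_true.mpr ⟨kv, hkv, by simp⟩
    rw [Bool.eq_iff_iff]
    rw [PySem.Set.contains_iff, mem_dsB_surv]
    simp only [htmd, Bool.true_and, Bool.and_eq_true, PySem.Set.contains_eq_listContains,
      List.contains_iff_mem, mem_dsA_avail, decide_eq_true_eq]
    constructor
    · rintro ⟨⟨kv', hkv', hs⟩, hd⟩
      exact Or.inr ⟨kv', hkv', hs, by simpa using hd⟩
    · rintro (h1|⟨kv', hkv', hs, hd⟩)
      · simp [PySem.Set.empty] at h1
      · exact ⟨⟨kv', hkv', hs⟩, by simpa using hd⟩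
  have hntm :
      tm.foldl (fun d kv =>
        if (dsA_avail im).contains kv.1 && decide ((PySem.Dict.mk tm).getD kv.1 0 ≥ th)
        then d.insert kv.1 kv.2 else d) PySem.Dict.empty
      = tm.foldl (fun d kv =>
        if (im.foldl
          (fun (st : PySem.Set String × PySem.Dict Int (List String)) kv =>
            let ns := dsB_ns (PySem.Dict.mk tm) th kv.2
            if ns.length ≠ 0 then (PySem.Set.update st.1 ns, st.2.insert kv.1 ns) else st)
          (PySem.Set.empty, PySem.Dict.empty)).1.contains kv.1
        then d.insert kv.1 kv.2 else d) PySem.Dict.empty := by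
    apply PySem.List.foldl_congr_mem
    intro acc kv hkv
    rw [hsurv kv hkv]
  exact Prod.ext (by rw [hnim]) (by simp only [dsA_ntm]; rw [hntm])

-- ===== VERDICT (by name: the statement is the Claim_ definition above) =====
theorem drop_streets_spec : Claim_equal_drop_streets := by
  intro im tm th _
  exact drop_streets_eq im tm th
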